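-- pv_equiv track=rewrite | github.com/dylanade/Competitive-Programming.py | 2155-all-divisions-with-the-highest-score-of-a-binary-array/2155-all-divisions-with-the-highest-score-of-a-binary-array.py | maxScoreIndices
-- ===== SOURCE A (Python) =====
-- from typing import List
--
-- def maxScoreIndices(nums: List[int]) -> List[int]:
--     max_score = nums.count(1)
--     indices = [0]
--     curr_score = max_score
--
--     for i, num in enumerate(nums):
--         if num == 0:
--             curr_score += 1
--         else:
--             curr_score -= 1
--
--         if curr_score > max_score:
--             max_score = curr_score
--             indices = [i+1]
--         elif curr_score == max_score:
--             indices.append(i+1)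
--
--     return indices
-- ===== SOURCE B (Python) =====
-- from typing import List
--
-- def maxScoreIndices(nums: List[int]) -> List[int]:
--     # phase 1: table of scores for every split point 0..n
--     total = nums.count(1)
--     scores = [total]
--     s = total
--     for num in nums:
--         s += 1 if num == 0 else -1
--         scores.append(s)
--     # phase 2: best score
--     best = max(scores)
--     # phase 3: all split points achieving it
--     return [i for i, s in enumerate(scores) if s == best]
-- ===== Notes on version B (the rewrite author's own statement) =====
-- stated objective: alternative
-- what changed: Replaced A's fused running-max loop (which tracks best score and resets/extends the index list inline) by three separate phases: build the full table of split scores, take max of the table, then filter the indices achieving it.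
import Mathlib
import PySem

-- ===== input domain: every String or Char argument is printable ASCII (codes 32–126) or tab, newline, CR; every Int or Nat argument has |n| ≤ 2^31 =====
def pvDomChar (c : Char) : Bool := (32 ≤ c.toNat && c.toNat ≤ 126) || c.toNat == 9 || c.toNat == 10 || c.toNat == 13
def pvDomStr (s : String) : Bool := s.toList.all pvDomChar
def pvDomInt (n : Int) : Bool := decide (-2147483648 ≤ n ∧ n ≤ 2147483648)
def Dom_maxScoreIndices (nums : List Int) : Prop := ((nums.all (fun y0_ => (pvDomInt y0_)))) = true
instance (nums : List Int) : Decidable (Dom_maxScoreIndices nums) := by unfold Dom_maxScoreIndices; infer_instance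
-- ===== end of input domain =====

-- B rebuilds A as three separate phases (score table, max, filter) instead of A's fused running-max loop; same cost (objective: alternative).

-- ===== PORT A =====
def maxScoreIndices (nums : List Int) : List Int :=
  let max_score : Int := (PySem.List.count nums 1 : Int)
  let st :=
    (PySem.List.enumerate nums 0).foldl
      (fun (st : Int × Int × List Int) p =>
        let curr := if p.2 == 0 then st.1 + 1 else st.1 - 1
        if curr > st.2.1 then (curr, curr, [p.1 + 1])
        else if curr == st.2.1 then (curr, st.2.1, st.2.2 ++ [p.1 + 1])
        else (curr, st.2.1, st.2.2))
      (max_score, max_score, ([0] : List Int))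
  st.2.2

-- ===== PORT B =====
def maxScoreIndices_alt (nums : List Int) : List Int :=
  let total : Int := (PySem.List.count nums 1 : Int)
  let st := nums.foldl
      (fun (st : Int × List Int) num =>
        let s := st.1 + (if num == 0 then 1 else -1)
        (s, st.2 ++ [s]))
      (total, ([total] : List Int))
  let scores := st.2
  match PySem.List.max? scores (fun y => y) with
  | some best => ((PySem.List.enumerate scores 0).filter (fun p => p.2 == best)).map (·.1)
  | none => []

-- ===== PRECONDITION & SPEC =====
def Spec_maxScoreIndices (nums : List Int) (out : List Int) : Prop := out = maxScoreIndices_alt nums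
instance (nums : List Int) (out : List Int) : Decidable (Spec_maxScoreIndices nums out) := by unfold Spec_maxScoreIndices; infer_instance

-- ===== CLAIM (what is proved, stated in full; the proofs are below) =====
def Claim_equal_maxScoreIndices : Prop := ∀ (nums : List Int), Dom_maxScoreIndices nums → Spec_maxScoreIndices nums (maxScoreIndices nums)

-- ===== LEMMAS AND PROOFS =====

-- the list of successive scores after each element, starting from score s
def pvScoresFrom (s : Int) : List Int → List Int
  | [] => []
  | x :: xs => (s + (if x == 0 then 1 else -1)) :: pvScoresFrom (s + (if x == 0 then 1 else -1)) xs

-- A's loop, re-expressed as a recursion over the score list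
def pvArgmaxAux : List Int → Int → Int → List Int → List Int
  | [], _, _, inds => inds
  | x :: xs, j, m, inds =>
    if x > m then pvArgmaxAux xs (j + 1) x [j]
    else if x == m then pvArgmaxAux xs (j + 1) m (inds ++ [j])
    else pvArgmaxAux xs (j + 1) m inds

lemma pv_le_foldl_max (xs : List Int) (a : Int) : a ≤ xs.foldl max a := by
  induction xs generalizing a with
  | nil => simp
  | cons x xs ih => exact le_trans (le_max_left a x) (ih (max a x))

lemma pvB_build (nums : List Int) (s : Int) (acc : List Int) :
    (nums.foldl (fun (st : Int × List Int) num =>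
        let t := st.1 + (if num == 0 then 1 else -1)
        (t, st.2 ++ [t])) (s, acc)).2 = acc ++ pvScoresFrom s nums := by
  induction nums generalizing s acc with
  | nil => simp [pvScoresFrom]
  | cons x xs ih =>
    simp only [List.foldl_cons]
    rw [ih]
    simp [pvScoresFrom]

lemma pvA_loop (nums : List Int) (i s m : Int) (inds : List Int) :
    ((PySem.List.enumerate nums i).foldl
      (fun (st : Int × Int × List Int) p =>
        let curr := if p.2 == 0 then st.1 + 1 else st.1 - 1
        if curr > st.2.1 then (curr, curr, [p.1 + 1])
        else if curr == st.2.1 then (curr, st.2.1, st.2.2 ++ [p.1 + 1])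
        else (curr, st.2.1, st.2.2))
      (s, m, inds)).2.2
    = pvArgmaxAux (pvScoresFrom s nums) (i + 1) m inds := by
  induction nums generalizing i s m inds with
  | nil => simp [pvScoresFrom, pvArgmaxAux, PySem.List.enumerate_nil]
  | cons x xs ih =>
    rw [PySem.List.enumerate_cons]
    by_cases hx : x = 0
    · simp only [pvScoresFrom, pvArgmaxAux, hx, List.foldl_cons]
      simp only [beq_self_eq_true, if_true]
      split_ifs with h1 h2 <;> simp_all
    · simp only [pvScoresFrom, pvArgmaxAux, List.foldl_cons]
      have hx' : (x == 0) = false := by simp [hx]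
      simp only [hx']
      have : s + -1 = s - 1 := by ring
      rw [← this]
      split_ifs with h1 h2 <;> simp_all

lemma pvArgmax_char (xs : List Int) (j m : Int) (inds : List Int) :
    pvArgmaxAux xs j m inds
    = (if m = xs.foldl max m then inds else [])
      ++ ((PySem.List.enumerate xs j).filter (fun p => p.2 == xs.foldl max m)).map (·.1) := by
  induction xs generalizing j m inds with
  | nil => simp [pvArgmaxAux, PySem.List.enumerate_nil]
  | cons x xs ih =>
    rw [PySem.List.enumerate_cons]
    have hM := pv_le_foldl_max xs (max m x)
    simp only [pvArgmaxAux, List.foldl_cons]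
    by_cases h1 : x > m
    · have hmx : max m x = x := max_eq_right (le_of_lt h1)
      have hne : ¬ m = xs.foldl max (max m x) := by
        intro h; rw [hmx] at h hM; omega
      rw [if_pos h1, ih]
      simp only [hmx] at *
      rw [if_neg hne]
      by_cases hx : x = xs.foldl max x
      · have hb : (x == xs.foldl max x) = true := beq_iff_eq.mpr hx
        rw [if_pos hx]
        simp [hb]
      · have hb : (x == xs.foldl max x) = false := beq_eq_false_iff_ne.mpr hx
        simp [hb, hx]
    · have hmx : max m x = m := max_eq_left (by omega)
      have hxne : x = m ∨ x < m := by omega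
      rw [if_neg h1]
      by_cases h2 : x = m
      · rw [if_pos (by simp [h2]), ih]
        simp only [hmx] at *
        by_cases hm : m = xs.foldl max m
        · have hb : (x == xs.foldl max m) = true := beq_iff_eq.mpr (h2 ▸ hm)
          simp [if_pos hm, hb]
        · have hb : (x == xs.foldl max m) = false :=
            beq_eq_false_iff_ne.mpr (by rw [h2]; exact hm)
          simp [if_neg hm, hb]
      · have hlt : x < m := by omega
        have hb : (x == xs.foldl max m) = false := beq_eq_false_iff_ne.mpr (by
          simp only [hmx] at hM; intro h; omega)
        rw [if_neg (by simp [h2]), ih]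
        simp only [hmx]
        simp [hb]

-- ===== VERDICT (by name: the statement is the Claim_ definition above) =====
theorem maxScoreIndices_spec : Claim_equal_maxScoreIndices := by
  intro nums _
  show maxScoreIndices nums = maxScoreIndices_alt nums
  unfold maxScoreIndices maxScoreIndices_alt
  simp only [pvB_build, List.singleton_append]
  set t : Int := (PySem.List.count nums 1 : Int) with ht
  rw [pvA_loop, PySem.List.max?_id_cons, pvArgmax_char, PySem.List.enumerate_cons]
  by_cases hm : t = (pvScoresFrom t nums).foldl max t
  · have hb : (t == (pvScoresFrom t nums).foldl max t) = true := beq_iff_eq.mpr hm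
    simp [if_pos hm, hb]
  · have hb : (t == (pvScoresFrom t nums).foldl max t) = false := beq_eq_false_iff_ne.mpr hm
    simp [if_neg hm, hb]
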